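-- pv_equiv track=rewrite | github.com/Allenchou0708/temp | analyze_work_edu.py | check_whether_time
-- ===== SOURCE A (Python) =====
-- def check_whether_time(part):
--     for i in range(1980,2024):
--         if part.find(str(i))!=-1:
--             return True
--
--     for i in ["January","February","March","April","May","June","July","August","September","October","November","December"]:
--         if part.find(i)!=-1:
--             return True
--
--     return False
-- ===== SOURCE B (Python) =====
-- _MONTHS = ("January", "February", "March", "April", "May", "June",
--            "July", "August", "September", "October", "November", "December")
-- _YEARS = {str(y) for y in range(1980, 2024)}
--
--
-- def check_whether_time(part):
--     # single left-to-right pass: at each position, is a year (4-char set lookup)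
--     # or a month name anchored here?
--     for j in range(len(part)):
--         if part[j:j + 4] in _YEARS or part.startswith(_MONTHS, j):
--             return True
--     return False
-- ===== Notes on version B (the rewrite author's own statement) =====
-- stated objective: alternative
-- what changed: Replaces A's 56 sequential full-string substring scans (44 year strings via .find, then 12 month names) with a single left-to-right positional pass that, at each index, tests the next 4 characters against a precomputed set of year strings and tests the 12 month names as anchored prefixes.
import Mathlib
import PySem

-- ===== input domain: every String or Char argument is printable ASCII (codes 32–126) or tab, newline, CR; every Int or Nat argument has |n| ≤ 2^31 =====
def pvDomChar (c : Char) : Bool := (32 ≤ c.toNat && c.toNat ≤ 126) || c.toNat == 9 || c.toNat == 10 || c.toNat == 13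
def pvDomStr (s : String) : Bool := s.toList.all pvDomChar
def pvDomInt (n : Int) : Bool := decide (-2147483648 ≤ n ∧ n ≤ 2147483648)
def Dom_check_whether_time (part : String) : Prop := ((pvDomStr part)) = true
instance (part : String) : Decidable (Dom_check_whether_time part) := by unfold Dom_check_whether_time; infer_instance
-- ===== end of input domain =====

-- B replaces A's 56 sequential full-string substring scans by one left-to-right
-- positional pass testing a 4-char year set lookup and anchored month prefixes
-- at each index (objective: alternative algorithm, same result).

-- ===== PORT A =====
def pvMonthsA : List String :=
  ["January", "February", "March", "April", "May", "June",
   "July", "August", "September", "October", "November", "December"]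

def check_whether_time (part : String) : Bool :=
  -- for i in range(1980,2024): if part.find(str(i)) != -1: return True
  if (PySem.List.pyRange 1980 2024 1).any
       (fun i => PySem.Str.find part (PySem.Int.toStr i) != -1) then true
  -- for i in [months]: if part.find(i) != -1: return True
  else if pvMonthsA.any (fun m => PySem.Str.find part m != -1) then true
  else false

-- ===== PORT B =====
def pvMonthsB : List (List Char) :=
  ["January".toList, "February".toList, "March".toList, "April".toList,
   "May".toList, "June".toList, "July".toList, "August".toList,
   "September".toList, "October".toList, "November".toList, "December".toList]

-- _YEARS = {str(y) for y in range(1980, 2024)}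
def pvYearsB : PySem.Set (List Char) :=
  PySem.Set.ofList ((PySem.List.pyRange 1980 2024 1).map PySem.Int.toChars)

-- the per-position test of B (the loop body at position j, on the tail part[j:])
def pvHit (t : List Char) : Bool :=
  PySem.Set.contains pvYearsB (t.take 4) || pvMonthsB.any (fun m => m.isPrefixOf t)

def pvScanB : List Char → Bool
  | [] => false
  | t@(_ :: rest) => if pvHit t then true else pvScanB rest

def check_whether_time_alt (part : String) : Bool := pvScanB part.toList

-- ===== PRECONDITION & SPEC =====
def Spec_check_whether_time (part : String) (out : Bool) : Prop := out = check_whether_time_alt part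
instance (part : String) (out : Bool) : Decidable (Spec_check_whether_time part out) := by unfold Spec_check_whether_time; infer_instance

-- ===== CLAIM (what is proved, stated in full; the proofs are below) =====
def Claim_equal_check_whether_time : Prop := ∀ (part : String), Dom_check_whether_time part → Spec_check_whether_time part (check_whether_time part)

-- ===== LEMMAS AND PROOFS =====

def pvYearLists : List (List Char) := (PySem.List.pyRange 1980 2024 1).map PySem.Int.toChars

theorem pvYearLists_len : ∀ y ∈ pvYearLists, y.length = 4 := by
  set_option maxRecDepth 4000 in decide

-- A = true iff some year string or some month name is an infix of the input
theorem pvA_iff (part : String) :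
    check_whether_time part = true ↔
      (∃ y ∈ pvYearLists, y <:+: part.toList) ∨
      (∃ m ∈ pvMonthsB, m <:+: part.toList) := by
  unfold check_whether_time
  split_ifs with h1 h2
  · simp only [true_iff]
    left
    simp only [List.any_eq_true, bne_iff_ne] at h1
    obtain ⟨i, hi, hfind⟩ := h1
    exact ⟨PySem.Int.toChars i, List.mem_map_of_mem hi, by
      have := (PySem.Str.find_ne_neg_one_iff part (PySem.Int.toStr i)).mp hfind
      rwa [PySem.Int.toList_toStr] at this⟩
  · simp only [true_iff]
    right
    simp only [List.any_eq_true, bne_iff_ne] at h2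
    obtain ⟨m, hm, hfind⟩ := h2
    refine ⟨m.toList, ?_, (PySem.Str.find_ne_neg_one_iff part m).mp hfind⟩
    revert hm; unfold pvMonthsA pvMonthsB; intro hm
    simp only [List.mem_cons, List.not_mem_nil, or_false] at hm ⊢
    rcases hm with h|h|h|h|h|h|h|h|h|h|h|h <;> subst h <;> simp
  · simp only [false_iff, not_or]
    constructor
    · rintro ⟨y, hy, hinf⟩
      apply h1
      simp only [List.any_eq_true, bne_iff_ne]
      obtain ⟨i, hi, rfl⟩ := List.mem_map.mp hy
      exact ⟨i, hi, (PySem.Str.find_ne_neg_one_iff part (PySem.Int.toStr i)).mpr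
        (by rwa [PySem.Int.toList_toStr])⟩
    · rintro ⟨m, hm, hinf⟩
      apply h2
      simp only [List.any_eq_true, bne_iff_ne]
      revert hm; unfold pvMonthsB; intro hm
      simp only [List.mem_cons, List.not_mem_nil, or_false] at hm
      rcases hm with h|h|h|h|h|h|h|h|h|h|h|h <;> subst h <;>
        exact ⟨_, by unfold pvMonthsA; simp, (PySem.Str.find_ne_neg_one_iff part _).mpr hinf⟩

theorem pvHit_nil : pvHit [] = false := by
  set_option maxRecDepth 4000 in decide

-- B's scan fires iff some suffix of the input passes the per-position test
theorem pvScanB_iff (t : List Char) :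
    pvScanB t = true ↔ ∃ s, s <:+ t ∧ pvHit s = true := by
  induction t with
  | nil =>
    constructor
    · intro h; exact absurd h (by simp [pvScanB])
    · rintro ⟨s, hs, hhit⟩
      rw [List.suffix_nil.mp hs, pvHit_nil] at hhit
      exact absurd hhit (by simp)
  | cons c rest ih =>
    show (if pvHit (c :: rest) then true else pvScanB rest) = true ↔ _
    split_ifs with h
    · exact ⟨fun _ => ⟨c :: rest, List.suffix_refl _, h⟩, fun _ => rfl⟩
    · rw [ih]
      constructor
      · rintro ⟨s, hs, hhit⟩; exact ⟨s, (List.suffix_cons_iff.mpr (Or.inr hs)), hhit⟩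
      · rintro ⟨s, hs, hhit⟩
        rcases List.suffix_cons_iff.mp hs with rfl | hs
        · exact absurd hhit (by simp [h])
        · exact ⟨s, hs, hhit⟩

-- the per-position test fires iff some pattern is an anchored prefix there
theorem pvHit_iff (s : List Char) :
    pvHit s = true ↔
      (∃ y ∈ pvYearLists, y <+: s) ∨ (∃ m ∈ pvMonthsB, m <+: s) := by
  unfold pvHit
  rw [Bool.or_eq_true, List.any_eq_true]
  constructor
  · rintro (hy | ⟨m, hm, hp⟩)
    · left
      have hmem : s.take 4 ∈ pvYearLists := by
        have := (PySem.Set.contains_iff _ _).mp hy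
        exact (PySem.Set.mem_ofList _ _).mp this
      exact ⟨s.take 4, hmem, List.take_prefix 4 s⟩
    · exact Or.inr ⟨m, hm, List.isPrefixOf_iff_prefix.mp hp⟩
  · rintro (⟨y, hy, hp⟩ | ⟨m, hm, hp⟩)
    · left
      have h4 : y.length = 4 := pvYearLists_len y hy
      have : s.take 4 = y := by
        have := List.prefix_iff_eq_take.mp hp
        rw [← h4, ← this]
      rw [PySem.Set.contains_iff, this]
      exact (PySem.Set.mem_ofList _ _).mpr hy
    · exact Or.inr ⟨m, hm, List.isPrefixOf_iff_prefix.mpr hp⟩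

-- infix = anchored prefix of some suffix, pushed through the two pattern families
theorem pvB_iff (part : String) :
    check_whether_time_alt part = true ↔
      (∃ y ∈ pvYearLists, y <:+: part.toList) ∨
      (∃ m ∈ pvMonthsB, m <:+: part.toList) := by
  unfold check_whether_time_alt
  rw [pvScanB_iff]
  constructor
  · rintro ⟨s, hs, hhit⟩
    rcases (pvHit_iff s).mp hhit with ⟨y, hy, hp⟩ | ⟨m, hm, hp⟩
    · exact Or.inl ⟨y, hy, List.infix_iff_prefix_suffix.mpr ⟨s, hp, hs⟩⟩
    · exact Or.inr ⟨m, hm, List.infix_iff_prefix_suffix.mpr ⟨s, hp, hs⟩⟩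
  · rintro (⟨y, hy, hinf⟩ | ⟨m, hm, hinf⟩)
    · obtain ⟨s, hp, hs⟩ := List.infix_iff_prefix_suffix.mp hinf
      exact ⟨s, hs, (pvHit_iff s).mpr (Or.inl ⟨y, hy, hp⟩)⟩
    · obtain ⟨s, hp, hs⟩ := List.infix_iff_prefix_suffix.mp hinf
      exact ⟨s, hs, (pvHit_iff s).mpr (Or.inr ⟨m, hm, hp⟩)⟩

-- ===== VERDICT (by name: the statement is the Claim_ definition above) =====
theorem check_whether_time_spec : Claim_equal_check_whether_time := by
  intro part _
  unfold Spec_check_whether_time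
  rw [Bool.eq_iff_iff, pvA_iff, pvB_iff]
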